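-- pv_equiv track=rewrite | github.com/small-java-world/DiffGR | diffgr/autoslice.py | _slice_segment
-- ===== SOURCE A (Python) =====
-- from typing import Any
--
-- def _change_blocks(lines: list[dict[str, Any]]) -> list[tuple[int, int]]:
--     blocks: list[tuple[int, int]] = []
--     index = 0
--     while index < len(lines):
--         kind = lines[index].get("kind")
--         if kind and kind != "context":
--             end = index
--             while end + 1 < len(lines) and (lines[end + 1].get("kind") not in (None, "context")):
--                 end += 1
--             blocks.append((index, end))
--             index = end + 1
--             continue
--         index += 1
--     return blocks
--
-- def _slice_segment(lines: list[dict[str, Any]], start: int, end: int, context_lines: int) -> list[dict[str, Any]]: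
--     blocks = _change_blocks(lines)
--     # Find nearest neighbor blocks for overlap avoidance.
--     prev_end = -1
--     next_start = len(lines)
--     for b_start, b_end in blocks:
--         if b_end < start:
--             prev_end = max(prev_end, b_end)
--         if b_start > end:
--             next_start = min(next_start, b_start)
--     seg_start = max(start - context_lines, prev_end + 1, 0)
--     seg_end = min(end + context_lines, next_start - 1, len(lines) - 1)
--     return lines[seg_start : seg_end + 1]
-- ===== SOURCE B (Python) =====
-- def _slice_segment(lines: list, start: int, end: int, context_lines: int) -> list:
--     # One streaming state-machine pass: track whether the current run of
--     # non-context change-ish lines contains a real change, updating the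
--     # nearest-neighbour boundaries on the fly (no block list is built).
--     n = len(lines)
--     prev_end = -1
--     next_start = n
--     in_block = False
--     for i, line in enumerate(lines):
--         kind = line.get("kind")
--         if kind is None or kind == "context":
--             if in_block and i - 1 < start:
--                 prev_end = max(prev_end, i - 1)
--             in_block = False
--         elif kind and not in_block:
--             in_block = True
--             if i > end:
--                 next_start = min(next_start, i)
--     if in_block and n - 1 < start:
--         prev_end = max(prev_end, n - 1)
--     seg_start = max(start - context_lines, prev_end + 1, 0)
--     seg_end = min(end + context_lines, next_start - 1, n - 1)
--     return lines[seg_start : seg_end + 1]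
-- ===== Notes on version B (the rewrite author's own statement) =====
-- stated objective: simpler
-- what changed: A builds an explicit list of change blocks with nested while loops and then scans that list for the nearest neighbouring blocks; B makes a single streaming state-machine pass over the lines that tracks whether it is inside a change block and updates the nearest-neighbour boundaries on the fly, never materialising the block list.
import Mathlib
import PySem

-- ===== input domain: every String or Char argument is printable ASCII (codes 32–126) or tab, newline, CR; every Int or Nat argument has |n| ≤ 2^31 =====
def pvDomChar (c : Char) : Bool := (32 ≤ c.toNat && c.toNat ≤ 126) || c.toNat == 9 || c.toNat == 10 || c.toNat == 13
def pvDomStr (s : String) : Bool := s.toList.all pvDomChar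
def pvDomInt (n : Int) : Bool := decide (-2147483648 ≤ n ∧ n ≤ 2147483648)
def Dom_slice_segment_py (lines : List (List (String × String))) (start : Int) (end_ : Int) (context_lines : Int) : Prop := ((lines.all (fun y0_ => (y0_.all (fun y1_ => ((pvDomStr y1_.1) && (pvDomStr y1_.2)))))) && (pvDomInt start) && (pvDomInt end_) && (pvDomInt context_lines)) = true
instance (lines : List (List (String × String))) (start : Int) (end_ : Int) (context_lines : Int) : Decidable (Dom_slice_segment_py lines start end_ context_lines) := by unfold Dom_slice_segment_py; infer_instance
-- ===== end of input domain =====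

-- B replaces A's two passes (explicit block-list construction with nested while loops,
-- then a scan over the blocks) by a single streaming state-machine pass over the lines;
-- objective: simpler/alternative, same O(n) cost.

-- ===== PORT A =====
-- line.get("kind")  (dict → assoc list, first match)
def pvGetKind (d : List (String × String)) : Option String :=
  (d.find? (fun p => p.1 == "kind")).map (fun p => p.2)

-- "kind and kind != 'context'"  (None and "" are falsy)
def pvTruthyChange (k : Option String) : Bool :=
  match k with
  | none => false
  | some s => !(s == "") && !(s == "context")

-- "kind not in (None, 'context')"
def pvNotCtx (k : Option String) : Bool :=
  match k with
  | none => false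
  | some s => !(s == "context")

-- inner while loop of _change_blocks: extend the run end
def pvRunEnd (lines : List (List (String × String))) (e : Nat) : Nat :=
  if h : e + 1 < lines.length ∧ pvNotCtx (pvGetKind (lines.getD (e + 1) [])) = true then
    pvRunEnd lines (e + 1)
  else e
termination_by lines.length - e
decreasing_by obtain ⟨h1, _⟩ := h; omega

-- needed for pvBlocks' termination
theorem pvRunEnd_ge (lines : List (List (String × String))) (e : Nat) :
    e ≤ pvRunEnd lines e := by
  fun_induction pvRunEnd lines e with
  | case1 e h ih => omega
  | case2 e h => omega

-- outer while loop of _change_blocks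
def pvBlocks (lines : List (List (String × String))) (index : Nat) : List (Nat × Nat) :=
  if h : index < lines.length then
    if pvTruthyChange (pvGetKind (lines.getD index [])) then
      let e := pvRunEnd lines index
      (index, e) :: pvBlocks lines (e + 1)
    else pvBlocks lines (index + 1)
  else []
termination_by lines.length - index
decreasing_by
  · have := pvRunEnd_ge lines index; omega
  · omega

-- body of A's "for b_start, b_end in blocks" loop
def pvStepA (start end_ : Int) (p : Int × Int) (b : Nat × Nat) : Int × Int :=
  ((if (b.2 : Int) < start then max p.1 (b.2 : Int) else p.1),
   (if end_ < (b.1 : Int) then min p.2 (b.1 : Int) else p.2))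

def slice_segment_py (lines : List (List (String × String))) (start : Int) (end_ : Int) (context_lines : Int) : List (List (String × String)) :=
  let blocks := pvBlocks lines 0
  let pn := blocks.foldl (pvStepA start end_) (-1, (lines.length : Int))
  let seg_start := max (max (start - context_lines) (pn.1 + 1)) 0
  let seg_end := min (min (end_ + context_lines) (pn.2 - 1)) ((lines.length : Int) - 1)
  PySem.List.slice lines (some seg_start) (some (seg_end + 1))

-- ===== PORT B =====
-- truthiness of kind ("" and None falsy)
def pvTruthy (k : Option String) : Bool :=
  match k with
  | none => false
  | some s => !(s == "")

-- body of B's "for i, line in enumerate(lines)" loop; state = (prev_end, next_start, in_block)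
def pvStepB (start end_ : Int) (s : Int × Int × Bool) (p : Int × List (String × String)) : Int × Int × Bool :=
  let kind := pvGetKind p.2
  if !(pvNotCtx kind) then
    ((if s.2.2 && decide (p.1 - 1 < start) then max s.1 (p.1 - 1) else s.1), s.2.1, false)
  else if pvTruthy kind && !s.2.2 then
    (s.1, (if end_ < p.1 then min s.2.1 p.1 else s.2.1), true)
  else s

def slice_segment_py_alt (lines : List (List (String × String))) (start : Int) (end_ : Int) (context_lines : Int) : List (List (String × String)) :=
  let n : Int := (lines.length : Int)
  let st := (PySem.List.enumerate lines).foldl (pvStepB start end_) (-1, n, false)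
  let pe := if st.2.2 && decide (n - 1 < start) then max st.1 (n - 1) else st.1
  let seg_start := max (max (start - context_lines) (pe + 1)) 0
  let seg_end := min (min (end_ + context_lines) (st.2.1 - 1)) (n - 1)
  PySem.List.slice lines (some seg_start) (some (seg_end + 1))

-- ===== PRECONDITION & SPEC =====
def Spec_slice_segment_py (lines : List (List (String × String))) (start : Int) (end_ : Int) (context_lines : Int) (out : List (List (String × String))) : Prop := out = slice_segment_py_alt lines start end_ context_lines
instance (lines : List (List (String × String))) (start : Int) (end_ : Int) (context_lines : Int) (out : List (List (String × String))) : Decidable (Spec_slice_segment_py lines start end_ context_lines out) := by unfold Spec_slice_segment_py; infer_instance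

-- ===== CLAIM (what is proved, stated in full; the proofs are below) =====
def Claim_equal_slice_segment_py : Prop := ∀ (lines : List (List (String × String))) (start : Int) (end_ : Int) (context_lines : Int), Dom_slice_segment_py lines start end_ context_lines → Spec_slice_segment_py lines start end_ context_lines (slice_segment_py lines start end_ context_lines)

-- ===== LEMMAS AND PROOFS =====

-- B's post-loop fix-up, as a function of the loop state
def pvFinish (lines : List (List (String × String))) (start : Int) (r : Int × Int × Bool) : Int × Int :=
  ((if r.2.2 && decide ((lines.length : Int) - 1 < start) then max r.1 ((lines.length : Int) - 1) else r.1), r.2.1)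

theorem pvTruthyChange_notCtx (k : Option String) (h : pvTruthyChange k = true) :
    pvNotCtx k = true := by
  cases k with
  | none => simp [pvTruthyChange] at h
  | some s => simp [pvTruthyChange, pvNotCtx] at *; exact h.2

theorem pvTruthyChange_truthy (k : Option String) (h : pvTruthyChange k = true) :
    pvTruthy k = true := by
  cases k with
  | none => simp [pvTruthyChange] at h
  | some s => simp [pvTruthyChange, pvTruthy] at *; exact h.1

theorem pvTruthy_false_of (k : Option String) (h1 : pvNotCtx k = true)
    (h2 : pvTruthyChange k = false) : pvTruthy k = false := by
  cases k with
  | none => simp [pvNotCtx] at h1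
  | some s =>
    simp [pvNotCtx, pvTruthyChange, pvTruthy] at *
    by_cases hs : s = ""
    · exact hs
    · exact absurd (h2 hs) h1

theorem pvDropCons (lines : List (List (String × String))) (a : Nat) (h : a < lines.length) :
    lines.drop a = lines.getD a [] :: lines.drop (a + 1) := by
  rw [List.getD_eq_getElem lines [] h]
  exact List.drop_eq_getElem_cons h

theorem pvRunEnd_lt (lines : List (List (String × String))) (e : Nat) (h : e < lines.length) :
    pvRunEnd lines e < lines.length := by
  fun_induction pvRunEnd lines e with
  | case1 e h' ih => exact ih h'.1
  | case2 e h' => exact h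

theorem pvRunEnd_run (lines : List (List (String × String))) (e : Nat) :
    ∀ j, e < j → j ≤ pvRunEnd lines e → pvNotCtx (pvGetKind (lines.getD j [])) = true := by
  fun_induction pvRunEnd lines e with
  | case1 e h ih =>
    intro j hj1 hj2
    by_cases hje : j = e + 1
    · subst hje; exact h.2
    · exact ih j (by omega) hj2
  | case2 e h =>
    intro j hj1 hj2
    omega

theorem pvRunEnd_stop (lines : List (List (String × String))) (e : Nat) (h : e < lines.length) :
    pvRunEnd lines e + 1 = lines.length ∨
    (pvRunEnd lines e + 1 < lines.length ∧ pvNotCtx (pvGetKind (lines.getD (pvRunEnd lines e + 1) [])) = false) := by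
  fun_induction pvRunEnd lines e with
  | case1 e h' ih => exact ih h'.1
  | case2 e h' =>
    by_cases h1 : e + 1 < lines.length
    · right
      refine ⟨h1, ?_⟩
      by_cases h2 : pvNotCtx (pvGetKind (lines.getD (e + 1) [])) = true
      · exact absurd ⟨h1, h2⟩ h'
      · simpa using h2
    · left; omega

-- the fold over the inside of a run (in_block = true) leaves the state unchanged
theorem pvRunSkip (lines : List (List (String × String))) (start end_ : Int) (a b : Nat)
    (pe ns : Int) (hab : a ≤ b) (hb : b ≤ lines.length)
    (hrun : ∀ j, a ≤ j → j < b → pvNotCtx (pvGetKind (lines.getD j [])) = true) :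
    List.foldl (pvStepB start end_) (pe, ns, true) (PySem.List.enumerate (lines.drop a) (a : Int))
    = List.foldl (pvStepB start end_) (pe, ns, true) (PySem.List.enumerate (lines.drop b) (b : Int)) := by
  by_cases hab' : a = b
  · subst hab'; rfl
  · have ha : a < lines.length := by omega
    rw [pvDropCons lines a ha, PySem.List.enumerate_cons]
    have hk : pvNotCtx (pvGetKind (lines.getD a [])) = true := hrun a (le_refl a) (by omega)
    have hk' := hk
    simp only [List.getD_eq_getElem?_getD] at hk'
    have hstep : pvStepB start end_ (pe, ns, true) ((a : Int), lines.getD a []) = (pe, ns, true) := by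
      simp [pvStepB, hk']
    rw [List.foldl_cons, hstep]
    have : ((a : Int) + 1) = ((a + 1 : Nat) : Int) := by push_cast; ring
    rw [this]
    exact pvRunSkip lines start end_ (a + 1) b pe ns (by omega) hb
      (fun j hj1 hj2 => hrun j (by omega) hj2)
termination_by b - a

-- main invariant: B's loop (started outside a block at index i) followed by the fix-up
-- computes the same (prev_end, next_start) as A's fold over the blocks from index i
theorem pvMain (lines : List (List (String × String))) (start end_ : Int) (i : Nat) (pe ns : Int) :
    pvFinish lines start
      (List.foldl (pvStepB start end_) (pe, ns, false) (PySem.List.enumerate (lines.drop i) (i : Int)))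
    = List.foldl (pvStepA start end_) (pe, ns) (pvBlocks lines i) := by
  by_cases hi : i < lines.length
  · rw [pvDropCons lines i hi, PySem.List.enumerate_cons, pvBlocks]
    rw [dif_pos hi]
    by_cases hc1 : pvTruthyChange (pvGetKind (lines.getD i [])) = true
    · rw [if_pos hc1]
      have hc2 : pvNotCtx (pvGetKind (lines.getD i [])) = true := pvTruthyChange_notCtx _ hc1
      have htr : pvTruthy (pvGetKind (lines.getD i [])) = true := pvTruthyChange_truthy _ hc1
      have hstep : pvStepB start end_ (pe, ns, false) ((i : Int), lines.getD i [])
          = (pe, (if end_ < (i : Int) then min ns (i : Int) else ns), true) := by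
        have hc2' := hc2; have htr' := htr
        simp only [List.getD_eq_getElem?_getD] at hc2' htr'
        simp [pvStepB, hc2', htr']
      rw [List.foldl_cons, hstep]
      set e := pvRunEnd lines i with he
      have hie : i ≤ e := pvRunEnd_ge lines i
      have helt : e < lines.length := pvRunEnd_lt lines i hi
      set ns' := (if end_ < (i : Int) then min ns (i : Int) else ns) with hns'
      have hcast : ((i : Int) + 1) = ((i + 1 : Nat) : Int) := by push_cast; ring
      rw [hcast]
      rw [pvRunSkip lines start end_ (i + 1) (e + 1) pe ns' (by omega) (by omega)
        (fun j hj1 hj2 => pvRunEnd_run lines i j (by omega) (by omega))]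
      have hAstep : pvStepA start end_ (pe, ns) (i, e)
          = ((if (e : Int) < start then max pe (e : Int) else pe), ns') := by
        simp [pvStepA, hns']
      rw [List.foldl_cons, hAstep]
      rcases pvRunEnd_stop lines i hi with hstop | ⟨hlt, hnc⟩
      · -- run reaches the end of the list
        rw [← he] at hstop
        have hdrop : lines.drop (e + 1) = [] := by
          apply List.drop_eq_nil_of_le; omega
        have hblocks : pvBlocks lines (e + 1) = [] := by
          rw [pvBlocks]; rw [dif_neg (by omega)]
        rw [hdrop, hblocks, PySem.List.enumerate_nil, List.foldl_nil, List.foldl_nil]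
        simp only [pvFinish]
        have : ((lines.length : Int) - 1) = (e : Int) := by omega
        rw [this]
        simp
      · -- run is followed by a non-change line at e + 1
        rw [← he] at hlt hnc
        rw [pvDropCons lines (e + 1) hlt, PySem.List.enumerate_cons]
        have hstep2 : pvStepB start end_ (pe, ns', true) (((e + 1 : Nat) : Int), lines.getD (e + 1) [])
            = ((if (e : Int) < start then max pe (e : Int) else pe), ns', false) := by
          have hnc' := hnc
          simp only [List.getD_eq_getElem?_getD] at hnc'
          have hcast1 : (((e + 1 : Nat) : Int) - 1) = (e : Int) := by push_cast; ring
          simp [pvStepB, hnc']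
        rw [List.foldl_cons, hstep2]
        have hcast2 : (((e + 1 : Nat) : Int) + 1) = ((e + 2 : Nat) : Int) := by push_cast; ring
        rw [hcast2]
        have hblocks : pvBlocks lines (e + 1) = pvBlocks lines (e + 2) := by
          rw [pvBlocks]; rw [dif_pos hlt]
          have : pvTruthyChange (pvGetKind (lines.getD (e + 1) [])) = false := by
            by_cases h : pvTruthyChange (pvGetKind (lines.getD (e + 1) [])) = true
            · exact absurd (pvTruthyChange_notCtx _ h) (by rw [hnc]; simp)
            · simpa using h
          rw [if_neg (by rw [this]; simp)]
        rw [hblocks]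
        exact pvMain lines start end_ (e + 2)
          (if (e : Int) < start then max pe (e : Int) else pe) ns'
    · rw [if_neg hc1]
      have hc1' : pvTruthyChange (pvGetKind (lines.getD i [])) = false := by simpa using hc1
      have hstep : pvStepB start end_ (pe, ns, false) ((i : Int), lines.getD i []) = (pe, ns, false) := by
        by_cases hc2 : pvNotCtx (pvGetKind (lines.getD i [])) = true
        · have htf := pvTruthy_false_of _ hc2 hc1'
          have hc2' := hc2; have htf' := htf
          simp only [List.getD_eq_getElem?_getD] at hc2' htf'
          simp [pvStepB, hc2', htf']
        · have hc2' : pvNotCtx (pvGetKind (lines.getD i [])) = false := by simpa using hc2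
          have hc2'' := hc2'
          simp only [List.getD_eq_getElem?_getD] at hc2''
          simp [pvStepB, hc2'']
      rw [List.foldl_cons, hstep]
      have hcast : ((i : Int) + 1) = ((i + 1 : Nat) : Int) := by push_cast; ring
      rw [hcast]
      exact pvMain lines start end_ (i + 1) pe ns
  · have hdrop : lines.drop i = [] := by apply List.drop_eq_nil_of_le; omega
    have hblocks : pvBlocks lines i = [] := by rw [pvBlocks]; rw [dif_neg hi]
    rw [hdrop, hblocks, PySem.List.enumerate_nil, List.foldl_nil, List.foldl_nil]
    simp [pvFinish]
termination_by lines.length - i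
decreasing_by
  · have := pvRunEnd_ge lines i; omega
  · omega

-- ===== VERDICT (by name: the statement is the Claim_ definition above) =====
theorem slice_segment_py_spec : Claim_equal_slice_segment_py := by
  intro lines start end_ context_lines _
  unfold Spec_slice_segment_py slice_segment_py slice_segment_py_alt
  have h := pvMain lines start end_ 0 (-1) (lines.length : Int)
  simp only [List.drop_zero, Int.ofNat_zero] at h
  have h1 : (if ((PySem.List.enumerate lines).foldl (pvStepB start end_) (-1, (lines.length : Int), false)).2.2
        && decide ((lines.length : Int) - 1 < start) then
        max ((PySem.List.enumerate lines).foldl (pvStepB start end_) (-1, (lines.length : Int), false)).1 ((lines.length : Int) - 1)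
      else ((PySem.List.enumerate lines).foldl (pvStepB start end_) (-1, (lines.length : Int), false)).1)
      = (List.foldl (pvStepA start end_) (-1, (lines.length : Int)) (pvBlocks lines 0)).1 := by
    rw [← h]; rfl
  have h2 : ((PySem.List.enumerate lines).foldl (pvStepB start end_) (-1, (lines.length : Int), false)).2.1
      = (List.foldl (pvStepA start end_) (-1, (lines.length : Int)) (pvBlocks lines 0)).2 := by
    rw [← h]; rfl
  simp only []
  rw [h1, h2]
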